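-- pv_equiv track=rewrite | github.com/ANDRES-MONTES/Solution-to-Programming-Algorithms | reto_10.py | create_christmas_tree
-- ===== SOURCE A (Python) =====
-- def create_christmas_tree(ornaments:str, height:int):
--     result = ''
--     espacio = height  - 1
--     ancho = 1
--     adorno = 0
--     for _ in range(1, height + 1):
--         result += ' ' * espacio
--
--         for j in range(ancho):
--             if j + 1  == ancho:
--                 result += ornaments[adorno]
--                 adorno += 1
--
--                 if adorno == len(ornaments):
--                      adorno = 0
--
--                 continue
--
--             result += ornaments[adorno]
--             result += ' '
--             adorno += 1
--
--             if adorno == len(ornaments):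
--                 adorno = 0
--
--         espacio -= 1
--         ancho += 1
--         result += '\n'
--
--
--     result += ' ' * (height - 1 )
--     result += '|'
--
--
--     return result
-- ===== SOURCE B (Python) =====
-- def create_christmas_tree(ornaments: str, height: int):
--     # Arithmetic ornament indexing: row i starts at the triangular offset i*(i-1)//2,
--     # so each row is built independently and joined, no mutable wrap-around counter.
--     L = len(ornaments)
--     lines = []
--     for i in range(1, height + 1):
--         base = i * (i - 1) // 2
--         row = ' '.join(ornaments[(base + j) % L] for j in range(i))
--         lines.append(' ' * (height - i) + row + '\n')
--     lines.append(' ' * (height - 1) + '|')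
--     return ''.join(lines)
-- ===== Notes on version B (the rewrite author's own statement) =====
-- stated objective: simpler
-- what changed: Each row's ornament indices are computed arithmetically from the triangular offset i*(i-1)//2 modulo len(ornaments) and the row is built with ' '.join, replacing A's mutable counter that is incremented and reset on wrap, A's last-column special case, and A's character-by-character string concatenation.
import Mathlib
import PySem

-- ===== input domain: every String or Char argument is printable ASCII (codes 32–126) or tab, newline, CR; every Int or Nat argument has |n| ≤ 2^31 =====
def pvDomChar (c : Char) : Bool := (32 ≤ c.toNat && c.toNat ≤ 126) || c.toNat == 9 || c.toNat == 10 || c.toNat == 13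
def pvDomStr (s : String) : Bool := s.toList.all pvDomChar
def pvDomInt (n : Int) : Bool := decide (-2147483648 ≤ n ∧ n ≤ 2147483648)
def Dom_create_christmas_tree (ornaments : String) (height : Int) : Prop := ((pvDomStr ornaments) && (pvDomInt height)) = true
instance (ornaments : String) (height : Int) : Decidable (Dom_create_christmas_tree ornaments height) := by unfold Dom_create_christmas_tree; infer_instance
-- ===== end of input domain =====

-- B replaces A's mutable wrap-around ornament counter and last-column special case by
-- arithmetic indexing (triangular base offset mod len) with a per-row join; same asymptotic cost, simpler.


-- ===== PORT A =====
-- ornaments[adorno]: under Pre_ the index adorno is always in range, so the .getD ' '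
-- default is unreachable (it stands for Python's IndexError, excluded by Pre_).
def pvA_inner (cs : List Char) (ancho : Int) (st : List Char × Int) (j : Int) : List Char × Int :=
  if j + 1 == ancho then
    let res := st.1 ++ [(PySem.List.pyGet? cs st.2).getD ' ']
    let adorno := st.2 + 1
    (res, if adorno == (cs.length : Int) then 0 else adorno)
  else
    let res := st.1 ++ [(PySem.List.pyGet? cs st.2).getD ' '] ++ [' ']
    let adorno := st.2 + 1
    (res, if adorno == (cs.length : Int) then 0 else adorno)

def pvA_outer (cs : List Char) (st : List Char × Int × Int × Int) (_i : Int) :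
    List Char × Int × Int × Int :=
  match st with
  | (res, espacio, ancho, adorno) =>
    let res := res ++ List.replicate espacio.toNat ' '
    let p := (PySem.List.pyRange 0 ancho 1).foldl (pvA_inner cs ancho) (res, adorno)
    (p.1 ++ ['\n'], espacio - 1, ancho + 1, p.2)

def create_christmas_tree (ornaments : String) (height : Int) : String :=
  String.ofList
    (((PySem.List.pyRange 1 (height + 1) 1).foldl (pvA_outer ornaments.toList)
        ([], height - 1, 1, 0)).1 ++
      List.replicate (height - 1).toNat ' ' ++ ['|'])

-- ===== PORT B =====
-- ornaments[(base+j) % L]: the index is in [0, L) under Pre_, so .getD ' ' is unreachable.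
def pvB_row (cs : List Char) (i : Int) : List Char :=
  PySem.Chars.join [' ']
    ((PySem.List.pyRange 0 i 1).map (fun j =>
      [(PySem.List.pyGet? cs
          (PySem.Int.mod (PySem.Int.floordiv (i * (i - 1)) 2 + j) (cs.length : Int))).getD ' ']))

def create_christmas_tree_alt (ornaments : String) (height : Int) : String :=
  String.ofList
    ((PySem.List.pyRange 1 (height + 1) 1).foldl
        (fun acc i => acc ++ (List.replicate (height - i).toNat ' ' ++ pvB_row ornaments.toList i ++ ['\n'])) [] ++
      List.replicate (height - 1).toNat ' ' ++ ['|'])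

-- ===== PRECONDITION & SPEC =====
-- Pre_ excludes exactly the inputs where A raises IndexError (empty ornaments with height ≥ 1;
-- B raises ZeroDivisionError there).
def Pre_create_christmas_tree (ornaments : String) (height : Int) : Prop :=
  ornaments ≠ "" ∨ height < 1
instance (ornaments : String) (height : Int) : Decidable (Pre_create_christmas_tree ornaments height) := by
  unfold Pre_create_christmas_tree; infer_instance
def pvWitness_create_christmas_tree : String × Int := ("ox*", 4)

def Spec_create_christmas_tree (ornaments : String) (height : Int) (out : String) : Prop := out = create_christmas_tree_alt ornaments height
instance (ornaments : String) (height : Int) (out : String) : Decidable (Spec_create_christmas_tree ornaments height out) := by unfold Spec_create_christmas_tree; infer_instance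

-- ===== CLAIM (what is proved, stated in full; the proofs are below) =====
def Claim_equal_create_christmas_tree : Prop := ∀ (ornaments : String) (height : Int), Dom_create_christmas_tree ornaments height → Pre_create_christmas_tree ornaments height → Spec_create_christmas_tree ornaments height (create_christmas_tree ornaments height)

-- ===== LEMMAS AND PROOFS =====

-- row t (0-indexed; width t+1) in normal form: ornaments at positions (a+j) % L joined by ' '
def pvRow (cs : List Char) (a w : Nat) : List Char :=
  (List.range (w - 1)).flatMap (fun j => [cs.getD ((a + j) % cs.length) ' ', ' ']) ++
    [cs.getD ((a + (w - 1)) % cs.length) ' ']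

def pvTri (k : Nat) : Nat := k * (k + 1) / 2

def pvBody (cs : List Char) (height : Int) (k : Nat) : List Char :=
  (List.range k).flatMap (fun (t : Nat) =>
    List.replicate (height - 1 - (t : Int)).toNat ' ' ++
      pvRow cs (pvTri t % cs.length) (t + 1) ++ ['\n'])

theorem pvA_inner_prefix (cs : List Char) (hL : 0 < cs.length) (Wi : Int) (m a : Nat)
    (hm : (m : Int) < Wi) (ha : a < cs.length) (res : List Char) :
    (PySem.List.pyRange 0 (m : Int) 1).foldl (pvA_inner cs Wi) (res, (a : Int)) =
      (res ++ (List.range m).flatMap (fun j => [cs.getD ((a + j) % cs.length) ' ', ' ']),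
       (((a + m) % cs.length : Nat) : Int)) := by
  induction m with
  | zero =>
      rw [show ((0 : Nat) : Int) = 0 from rfl, PySem.List.pyRange_one_eq_nil le_rfl]
      simp [Nat.mod_eq_of_lt ha]
  | succ m ih =>
      have h1 : ((m + 1 : Nat) : Int) = (m : Int) + 1 := by push_cast; ring
      rw [h1, PySem.List.pyRange_one_succ_right (by positivity), List.foldl_append,
        ih (by omega), List.foldl_cons, List.foldl_nil]
      have hmod : (a + m) % cs.length < cs.length := Nat.mod_lt _ hL
      have hcond : (((m : Int) + 1) == Wi) = false := by
        simp only [beq_eq_false_iff_ne, ne_eq]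
        intro h; omega
      have hkey : ((a + m) % cs.length + 1) % cs.length = (a + (m + 1)) % cs.length := by
        rw [Nat.mod_add_mod, Nat.add_assoc]
      unfold pvA_inner
      simp only [hcond, Bool.false_eq_true, if_false, PySem.List.pyGet?_natCast]
      by_cases hwrap : (a + m) % cs.length + 1 = cs.length
      · have hb : ((((a + m) % cs.length : Nat) : Int) + 1 == ((cs.length : Nat) : Int)) = true := by
          simp only [beq_iff_eq]; omega
        simp only [hb, if_true]
        refine Prod.ext ?_ ?_
        · simp [List.range_succ, List.getD]
        · show (0 : Int) = (((a + (m + 1)) % cs.length : Nat) : Int)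
          rw [← hkey, hwrap, Nat.mod_self]; rfl
      · have hb : ((((a + m) % cs.length : Nat) : Int) + 1 == ((cs.length : Nat) : Int)) = false := by
          simp only [beq_eq_false_iff_ne, ne_eq]; intro h; omega
        simp only [hb, Bool.false_eq_true, if_false]
        refine Prod.ext ?_ ?_
        · simp [List.range_succ, List.getD]
        · show (((a + m) % cs.length : Nat) : Int) + 1 = (((a + (m + 1)) % cs.length : Nat) : Int)
          rw [← hkey, Nat.mod_eq_of_lt (show (a + m) % cs.length + 1 < cs.length by omega)]; push_cast; ring

theorem pvA_inner_full (cs : List Char) (hL : 0 < cs.length) (W a : Nat)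
    (hW : 1 ≤ W) (ha : a < cs.length) (res : List Char) :
    (PySem.List.pyRange 0 (W : Int) 1).foldl (pvA_inner cs (W : Int)) (res, (a : Int)) =
      (res ++ pvRow cs a W, (((a + W) % cs.length : Nat) : Int)) := by
  obtain ⟨m, rfl⟩ : ∃ m, W = m + 1 := ⟨W - 1, by omega⟩
  have h1 : ((m + 1 : Nat) : Int) = (m : Int) + 1 := by push_cast; ring
  rw [h1, PySem.List.pyRange_one_succ_right (by positivity), List.foldl_append,
    pvA_inner_prefix cs hL ((m : Int) + 1) m a (by omega) ha res, List.foldl_cons, List.foldl_nil]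
  have hmod : (a + m) % cs.length < cs.length := Nat.mod_lt _ hL
  have hkey : ((a + m) % cs.length + 1) % cs.length = (a + (m + 1)) % cs.length := by
    rw [Nat.mod_add_mod, Nat.add_assoc]
  unfold pvA_inner
  simp only [beq_self_eq_true, if_true, PySem.List.pyGet?_natCast]
  refine Prod.ext ?_ ?_
  · simp [pvRow, List.getD]
  · by_cases hwrap : (a + m) % cs.length + 1 = cs.length
    · have hb : ((((a + m) % cs.length : Nat) : Int) + 1 == ((cs.length : Nat) : Int)) = true := by
        simp only [beq_iff_eq]; omega
      simp only [hb, if_true]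
      show (0 : Int) = (((a + (m + 1)) % cs.length : Nat) : Int)
      rw [← hkey, hwrap, Nat.mod_self]; rfl
    · have hb : ((((a + m) % cs.length : Nat) : Int) + 1 == ((cs.length : Nat) : Int)) = false := by
        simp only [beq_eq_false_iff_ne, ne_eq]; intro h; omega
      simp only [hb, Bool.false_eq_true, if_false]
      show (((a + m) % cs.length : Nat) : Int) + 1 = (((a + (m + 1)) % cs.length : Nat) : Int)
      rw [← hkey, Nat.mod_eq_of_lt (show (a + m) % cs.length + 1 < cs.length by omega)]; push_cast; ring

theorem pvJoin_singletons (g : Nat → Char) (l : List Nat) (h : l ≠ []) :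
    PySem.Chars.join [' '] (l.map (fun x => [g x])) =
      l.dropLast.flatMap (fun x => [g x, ' ']) ++ [g (l.getLast h)] := by
  induction l with
  | nil => exact absurd rfl h
  | cons x t ih =>
      cases t with
      | nil => simp [PySem.Chars.join_singleton]
      | cons y r =>
          have hih := ih (by simp)
          rw [List.map_cons] at hih
          rw [List.map_cons, List.map_cons, PySem.Chars.join_cons_cons, hih]
          simp [List.getLast_cons]

theorem pvB_row_eq (cs : List Char) (_hL : 0 < cs.length) (W : Nat) (hW : 1 ≤ W) :
    pvB_row cs (W : Int) = pvRow cs (pvTri (W - 1) % cs.length) W := by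
  have htri : pvTri (W - 1) = W * (W - 1) / 2 := by
    unfold pvTri
    congr 1
    have : W - 1 + 1 = W := by omega
    rw [this, Nat.mul_comm]
  have hcast : ((W : Int)) * ((W : Int) - 1) = ((W * (W - 1) : Nat) : Int) := by
    have : ((W - 1 : Nat) : Int) = (W : Int) - 1 := by omega
    push_cast [← this]; ring
  have hfun : ∀ j : Nat,
      (PySem.List.pyGet? cs
          (PySem.Int.mod (PySem.Int.floordiv ((W : Int) * ((W : Int) - 1)) 2 + (j : Int))
            ((cs.length : Nat) : Int))).getD ' ' =
        cs.getD ((pvTri (W - 1) + j) % cs.length) ' ' := by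
    intro j
    rw [hcast, show ((2 : Int)) = ((2 : Nat) : Int) from rfl, PySem.Int.floordiv_natCast,
      show ((W * (W - 1) / 2 : Nat) : Int) + ((j : Nat) : Int) = ((W * (W - 1) / 2 + j : Nat) : Int) by push_cast; ring,
      PySem.Int.mod_natCast, PySem.List.pyGet?_natCast, ← htri]
    simp [List.getD]
  unfold pvB_row
  rw [PySem.List.pyRange_zero_nat, List.map_map]
  simp only [Function.comp_def, hfun]
  obtain ⟨m, rfl⟩ : ∃ m, W = m + 1 := ⟨W - 1, by omega⟩
  rw [pvJoin_singletons (fun j => cs.getD ((pvTri (m + 1 - 1) + j) % cs.length) ' ')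
      (List.range (m + 1)) (by simp)]
  have hlast : (List.range (m + 1)).getLast (by simp) = m := by
    rw [List.getLast_eq_getElem]; simp
  rw [hlast, List.range_succ, List.dropLast_concat]
  unfold pvRow
  simp only [Nat.add_sub_cancel]
  have hshift : (fun (j : Nat) => [cs.getD ((pvTri m % cs.length + j) % cs.length) ' ', ' ']) =
      (fun (j : Nat) => [cs.getD ((pvTri m + j) % cs.length) ' ', ' ']) := by
    funext j; rw [Nat.mod_add_mod]
  rw [hshift, Nat.mod_add_mod]

theorem pvTri_succ (k : Nat) : pvTri (k + 1) = pvTri k + (k + 1) := by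
  unfold pvTri
  have h : (k + 1) * (k + 1 + 1) = k * (k + 1) + (k + 1) * 2 := by ring
  rw [h, Nat.add_mul_div_right _ _ (by norm_num)]

theorem pvA_fold (cs : List Char) (hL : 0 < cs.length) (height : Int) (k : Nat)
    (hk : (k : Int) ≤ height) :
    (PySem.List.pyRange 1 ((k : Int) + 1) 1).foldl (pvA_outer cs) ([], height - 1, 1, 0) =
      (pvBody cs height k, height - 1 - k, (k : Int) + 1, ((pvTri k % cs.length : Nat) : Int)) := by
  induction k with
  | zero =>
      rw [show ((0 : Nat) : Int) + 1 = 1 from rfl, PySem.List.pyRange_one_eq_nil le_rfl]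
      simp [pvBody, pvTri]
  | succ k ih =>
      have h1 : ((k + 1 : Nat) : Int) = (k : Int) + 1 := by push_cast; ring
      rw [h1, PySem.List.pyRange_one_succ_right (by omega), List.foldl_append,
        ih (by omega), List.foldl_cons, List.foldl_nil]
      unfold pvA_outer
      have hinner := pvA_inner_full cs hL (k + 1) (pvTri k % cs.length) (by omega)
        (Nat.mod_lt _ hL) (pvBody cs height k ++ List.replicate (height - 1 - (k : Int)).toNat ' ')
      rw [show ((k : Int) + 1) = ((k + 1 : Nat) : Int) from by push_cast; ring]
      simp only [hinner]
      refine Prod.ext ?_ (Prod.ext (by dsimp only; push_cast; ring) (Prod.ext (by dsimp only) ?_))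
      · show pvBody cs height k ++ List.replicate (height - 1 - (k : Int)).toNat ' ' ++
            pvRow cs (pvTri k % cs.length) (k + 1) ++ ['\n'] = pvBody cs height (k + 1)
        unfold pvBody
        rw [List.range_succ, List.flatMap_append]
        simp [List.append_assoc]
      · show (((pvTri k % cs.length + (k + 1)) % cs.length : Nat) : Int) =
            ((pvTri (k + 1) % cs.length : Nat) : Int)
        rw [Nat.mod_add_mod, ← pvTri_succ]



theorem pvB_fold (cs : List Char) (hL : 0 < cs.length) (height : Int) (k : Nat)
    (hk : (k : Int) ≤ height) :
    (PySem.List.pyRange 1 ((k : Int) + 1) 1).foldl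
      (fun acc i => acc ++ (List.replicate (height - i).toNat ' ' ++ pvB_row cs i ++ ['\n'])) [] =
      pvBody cs height k := by
  induction k with
  | zero =>
      rw [show ((0 : Nat) : Int) + 1 = 1 from rfl, PySem.List.pyRange_one_eq_nil le_rfl]
      simp [pvBody]
  | succ k ih =>
      have h1 : ((k + 1 : Nat) : Int) = (k : Int) + 1 := by push_cast; ring
      rw [h1, PySem.List.pyRange_one_succ_right (by omega), List.foldl_append,
        ih (by omega), List.foldl_cons, List.foldl_nil]
      rw [show ((k : Int) + 1) = ((k + 1 : Nat) : Int) from by push_cast; ring,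
        pvB_row_eq cs hL (k + 1) (by omega)]
      simp only [Nat.add_sub_cancel]
      conv_rhs => rw [pvBody, List.range_succ, List.flatMap_append]
      have hsp : (height - ((k + 1 : Nat) : Int)).toNat = (height - 1 - (k : Int)).toNat := by
        congr 1; push_cast; ring
      rw [hsp]
      simp [pvBody, List.append_assoc]

-- ===== VERDICT (by name: the statement is the Claim_ definition above) =====
theorem create_christmas_tree_spec : Claim_equal_create_christmas_tree := by
  intro ornaments height _hdom hpre
  unfold Spec_create_christmas_tree create_christmas_tree create_christmas_tree_alt
  by_cases hh : height < 1
  · rw [PySem.List.pyRange_one_eq_nil (by omega)]; rfl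
  · have h1 : (1 : Int) ≤ height := by omega
    have hcs : ornaments.toList ≠ [] := by
      rcases hpre with h | h
      · simp only [ne_eq, ← String.toList_inj] at h; simpa using h
      · omega
    have hL : 0 < ornaments.toList.length := List.length_pos_iff.mpr hcs
    have hk : ((height.toNat : Int)) = height := Int.toNat_of_nonneg (by omega)
    rw [← hk, pvA_fold _ hL _ _ (by omega), pvB_fold _ hL _ _ (by omega)]
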